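/-
  Vorbis/State.lean AT WORK: one example of each thing a function proof or a composition unit does with it.
      (a) PLUGGING: a `Groups` record and its `Laws` (here a small model built from `OB1`, `HD3v`, `DeinitOK`: it shows that the laws
          are satisfiable together, and what the real `groups_laws` will look like)
      (b) USE: check sites of vorbis_deinit from `DeinitOK`; the index bounds of vorbis_finish_frame from `FinishPre` to a check site
      (c) FRAME: a clause carried over a push, over an allocator's store to `temp_offset`, over a callee's footprint
      (d) TRANSPORT: the two-address lemma of a clause that reads a TABLE OF POINTERS (CM3's shape) and its instance `Copied`;
          the whole `VorbisOK` through `*f = p`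
      (e) THE POINTS: an error return between two sections of start_decoder; `return TRUE`; the shadow layer from Q0's `ShadowInv`
      (f) the window arithmetic end to end: vorbis_decode_packet_rest's tail gives vorbis_finish_frame's precondition
-/
import Vorbis.State
import Vorbis.ObjBlock
namespace Vorbis.StateTest
open X86 X86.User Asan Vorbis

/-! ### (a) Plugging the groups in -/

/-- A stand-in for the header group: HD3 as arithmetic. A FIELD group: it reads two fields of `*f`. -/
def ToyHeader : Group := fun _ mem f => HD3v (stb_vorbis.blocksize_0 mem f) (stb_vorbis.blocksize_1 mem f)

/-- The two-address lemma of a FIELD group: unfold the accessors, rewrite each read with `ObjEq.i32 … (by decide)`. -/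
theorem ToyHeader.transfer {Blk : Block → Prop} {mem mem' : Mem} {p f : Nat} (h : ToyHeader Blk mem p)
    (he : ObjEq [(152, 160)] mem p mem' f) : ToyHeader Blk mem' f := by
  unfold ToyHeader at *
  simp only [vacc, voff] at h ⊢
  rw [he.i32 152 (by decide), he.i32 156 (by decide)]
  exact h

/-- A FIELD group moves: the instance `Copied` of its two-address lemma. -/
theorem ToyHeader.moves : Group.Moves ToyHeader :=
  fun _ _ _ _ _ _ hm h => ToyHeader.transfer h (hm.objEq (by decide))

/-- A group that says nothing (the model's codebooks, floors, … ). -/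
def Trivial : Group := fun _ _ _ => True

theorem Trivial.good : Group.Good Trivial := ⟨fun _ _ _ _ _ _ _ _ => trivial, fun _ _ _ _ _ _ _ _ _ => trivial⟩

theorem Trivial.goodGiven (Q : Group) : Group.GoodGiven Q Trivial :=
  ⟨fun _ _ _ _ _ _ _ _ _ => trivial, fun _ _ _ _ _ _ _ _ _ _ => trivial⟩

/-- The model's header group. -/
def ModelHeader : Group := ToyHeader

theorem ModelHeader.good : Group.Good ModelHeader := by
  constructor
  · exact ToyHeader.moves
  · intro Blk Blk' mem mem' f ha _ hob h
    have hk := ha _ hob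
    exact ToyHeader.transfer h (ObjEq.of_same hk.same hk.inside (by decide))

/-- **A `Groups` record**: the shape of the real one (Vorbis/Invariant.lean: `groups len`). In this model the arena says only
`alloc_buffer ≠ 0`, and the comment / codebook / residue / mapping groups are all `DeinitOK`, which contains their H-clauses. -/
def model : Groups where
  Arena := Unit
  ArenaOK := fun _ mem f => stb_vorbis.alloc.alloc_buffer mem f ≠ 0
  ADO := fun _ mem f => stb_vorbis.alloc.alloc_buffer mem f ≠ 0
  ADOBusy := fun _ _ mem f => stb_vorbis.alloc.alloc_buffer mem f ≠ 0
  NoTemps := fun _ => True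
  Fresh := fun _ => True
  HasSetup := fun _ _ => True
  ZF := fun _ _ _ => True
  Bits := fun Blk _ f => OB1 Blk f
  HeaderOK := ModelHeader
  CommentOK := DeinitOK
  CB0 := DeinitOK
  CodebookOK := Trivial
  FloorOK := Trivial
  FinalYOK := Trivial
  ResidueOK := DeinitOK
  MappingOK := DeinitOK
  ModeOK := Trivial
  BuffersOK := Trivial
  MdctOK := Trivial
  TempOK := Trivial

/-- The buffer pointer follows the copy. -/
theorem buffer_moves {mem mem' : Mem} {p f : Nat} (hc : Copied mem p mem' f Off.sizeof.stb_vorbis)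
    (h : stb_vorbis.alloc.alloc_buffer mem p ≠ 0) : stb_vorbis.alloc.alloc_buffer mem' f ≠ 0 := by
  simp only [vacc, voff] at h hc ⊢
  rw [hc.u64 112 (by omega)]
  exact h

/-- **The laws hold in the model**: so `Groups.Laws` is satisfiable; the real ones are `groups_laws` of Vorbis/Invariant.lean. -/
theorem model_laws : model.Laws where
  bits_ob1 := fun h => h
  arena_buffer := fun h => h
  ado_arena := fun h => ⟨h, trivial⟩
  header_hd3v := fun h => h
  comment_h1 := fun h => h.h1
  cb0_h4 := fun h => h.h4
  residue_h2 := fun h => h.h2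
  residue_h3 := fun h _ => h.h3
  mapping_h5 := fun h => h.h5
  arena_moves := fun hc h => buffer_moves hc h
  ado_moves := fun hc h => buffer_moves hc h
  bits := ⟨OB1.moves, OB1.carries⟩
  header := ModelHeader.good
  comment := ⟨DeinitOK.moves, DeinitOK.carries⟩
  cb0 := ⟨DeinitOK.moves, DeinitOK.carries⟩
  codebook := fun _ _ _ _ _ _ _ _ _ => trivial
  floor := Trivial.good
  finalY := Trivial.goodGiven _
  residue := ⟨fun Blk Blk' mem mem' p f hm _ h => DeinitOK.moves Blk Blk' mem mem' p f hm h,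
    fun Blk Blk' mem mem' f ha hB hob _ h => DeinitOK.carries Blk Blk' mem mem' f ha hB hob h⟩
  mapping := ⟨DeinitOK.moves, DeinitOK.carries⟩
  mode := Trivial.good
  buffers := Trivial.goodGiven _
  mdct := Trivial.good
  temp := Trivial.goodGiven _

/-! ### (b) USE: check sites -/

/-- vorbis_deinit, `setup_free(p, p->comment_list[i])`: `__asan_load8_noabort(comment_list + 8·i)` with the loop's `i` below
`comment_list_length`. The address in the shape the stepper leaves (`mov rax,[rbx+0x28]; lea rdi,[rax+r12*8]`): the free `a` of
the USE lemma takes it, `ha` is closed by unfolding the accessors and `omega`. -/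
example (Blk : Block → Prop) (Live : Nat → Prop) (mem : Mem) (f i : Nat) (hc : Covers Live mem) (hL : BlkLive Blk Live)
    (h : DeinitOK Blk mem f) (hi : (i : Int) < stb_vorbis.comment_list_length mem f) :
    AccessibleSmall mem (mem.u64 (f + 40) + i * 8) 8 := by
  have s := h.site_comment hL i hi (a := mem.u64 (f + 40) + i * 8) (by simp only [vacc, voff]; omega)
  exact s.acc hc

/-- vorbis_deinit, `r->classdata` of residue `i`: `__asan_load8_noabort(residue_config + 32·i + 16)`. -/
example (Blk : Block → Prop) (Live : Nat → Prop) (mem : Mem) (f i : Nat) (hc : Covers Live mem) (hL : BlkLive Blk Live)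
    (h : DeinitOK Blk mem f) (hnz : stb_vorbis.residue_config mem f ≠ 0) (hi : (i : Int) < stb_vorbis.residue_count mem f) :
    AccessibleSmall mem (stb_vorbis.residue_config_at mem f i + Off.Residue.classdata) 8 :=
  (h.site_residue hL hnz i hi _ 8 (by simp only [voff]; omega) (by omega) rfl).acc hc

/-- vorbis_deinit, the two-object step: `p->codebooks[r->classbook].entries`, in the register form the check is called with. -/
example (Blk : Block → Prop) (Live : Nat → Prop) (mem : Mem) (f i : Nat) (hc : Covers Live mem) (hL : BlkLive Blk Live)
    (h : DeinitOK Blk mem f) (hnz : stb_vorbis.residue_config mem f ≠ 0) (hi : (i : Int) < stb_vorbis.residue_count mem f)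
    (hcd : Residue.classdata mem (stb_vorbis.residue_config_at mem f i) ≠ 0) :
    AccessibleSmall mem (addr (stb_vorbis.codebooks_at mem f (Residue.classbook mem (stb_vorbis.residue_config_at mem f i))
      + Off.Codebook.entries)).toNat 4 :=
  (h.site_entries hL hnz i hi hcd rfl).acc_addr hc

/-- Any `[rbx + const]` site of vorbis_deinit: `p->mapping_count` at `f + 464`. -/
example (Blk : Block → Prop) (Live : Nat → Prop) (mem : Mem) (f : Nat) (hc : Covers Live mem) (hL : BlkLive Blk Live)
    (h : DeinitOK Blk mem f) : AccessibleSmall mem (f + 464) 4 :=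
  (h.ob1.site hL 464 4 (by simp only [voff]; omega) (by omega) rfl).acc hc

/-- **vorbis_finish_frame, the mixing loop**: `__asan_load4_noabort(&f->channel_buffers[i][left + j])`. M6 gives the allocated block of
`4·b1` bytes; W3′ and `pl ≤ b1 / 2` give the index bound (`FinishPre.mix_chan`); the rest is `Site.of_blk`. `left`, `j`, `pl`
are the C `int`s; `cb` is the pointer loaded from `f->channel_buffers[i]`. -/
example (Blk : Block → Prop) (Live : Nat → Prop) (mem : Mem) (cb : Nat) (b1 len left right pl j : Int) (hc : Covers Live mem)
    (hL : BlkLive Blk Live) (hB : Blk ⟨cb, 4 * b1.toNat⟩) (hpre : FinishPre b1 len left right) (hpl : pl ≤ b1 / 2)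
    (hj0 : 0 ≤ j) (hj : j < pl) : AccessibleSmall mem (cb + 4 * (left + j).toNat) 4 := by
  have hb := hpre.mix_chan hpl hj0 hj
  exact (Site.of_blk hL hB (by dsimp only; omega) (by dsimp only; omega) (by omega)).acc hc

/-- **vorbis_finish_frame, the saving loop**: the store `previous_window[i][j] = …` under the loop test `right + j < len`. -/
example (Blk : Block → Prop) (Live : Nat → Prop) (mem : Mem) (pw : Nat) (b1 len left right j : Int) (hc : Covers Live mem)
    (hL : BlkLive Blk Live) (hB : Blk ⟨pw, 2 * b1.toNat⟩) (hpre : FinishPre b1 len left right) (hj0 : 0 ≤ j)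
    (hj : right + j < len) : AccessibleSmall mem (pw + 4 * j.toNat) 4 := by
  have hb := hpre.save_write hj0 hj
  exact (Site.of_blk hL hB (by dsimp only; omega) (by dsimp only; omega) (by omega)).acc hc

/-- The new `previous_length` satisfies M7 again, and the returned sample count fits the channel buffer. -/
example (b1 len left right : Int) (hpre : FinishPre b1 len left right) :
    (-b1 ≤ len - right ∧ len - right ≤ b1 / 2) ∧ left + ((if len < right then len else right) - left) ≤ b1 := by
  have h1 := hpre.prev_len
  have h2 := hpre.result
  constructor
  · exact h1
  · omega

/-! ### (c) FRAME -/

/-- A push of vorbis_deinit (`push r14` below every live object): `DeinitOK` is carried (`AgreeOn.of_writeLE`, `AgreeOn.allKept`,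
`DeinitOK.agree`). The stack bytes below rsp belong to no live object: hypothesis `hstk`. -/
example (Blk : Block → Prop) (Live : Nat → Prop) (mem : Mem) (f : Nat) (sp : Word) (v : Nat) (hc : Covers Live mem)
    (hL : BlkLive Blk Live) (hok : BlkOK Blk) (h : DeinitOK Blk mem f) (hsp : sp.toNat + 8 ≤ 0x800000)
    (hstk : ∀ x, Live x → x < sp.toNat ∨ sp.toNat + 8 ≤ x) : DeinitOK Blk (mem.writeLE sp 8 v) f := by
  apply h.agree
  apply AgreeOn.allKept _ hL hok
  apply AgreeOn.of_writeLE mem sp 8 v (by omega) _ hstk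
  intro x hx
  have := hc.inside x hx
  omega

/-- setup_temp_malloc's store `f->temp_offset = …` (`mov [rbx+0x84],eax`): W1 is carried, because the object is `ObjSame`. -/
example (mem : Mem) (f v : Nat) (h : W1 mem f) (hf : f + 1808 ≤ 0xC00000) : W1 (mem.writeLE (addr f + 132) 4 v) f := by
  apply h.frame
  have e : (addr f + 132).toNat = f + 132 := by
    simp only [vfield]
    exact toNat_addr _ (by omega)
  apply ObjSame.of_writeLE mem f _ 4 v (by omega) (by simp only [voff]; omega)
  simp only [voff]
  omega

/-- A callee whose footprint is one window off every allocated block (a leaf that writes only its own frame): the whole `VorbisOK`. -/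
example (G : Groups) (hL : G.Laws) (Blk : Block → Prop) (hok : BlkOK Blk) (mem mem' : Mem) (f lo hi : Nat)
    (h : VorbisOK G Blk mem f) (hs : Mem.SameExcept [⟨lo, hi⟩] mem mem')
    (hd : ∀ B, Blk B → B.base + B.size ≤ lo ∨ hi ≤ B.base) : VorbisOK G Blk mem' f := by
  apply VorbisOK.carries hL Blk Blk mem mem' f _ (fun _ hb => hb) (h.ob1 hL).blk h
  apply AllKept.of_sameExcept hok hs
  intro B hB w hw
  have e : w = ⟨lo, hi⟩ := List.mem_singleton.mp hw
  subst e
  exact hd B hB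

/-! ### (d) TRANSPORT -/

/-- A clause of CM3's shape: `comment_list` is an allocated block of `8·n` bytes, and every word of it is the base of an allocated
block of 1 byte. It reads a FIELD of `*f` (the pointer), the CONTENT of the block it points to (the table), and states a SHAPE
fact about what the table points to. -/
def ToyTable (n : Nat) : Group := fun Blk mem f =>
  Blk ⟨stb_vorbis.comment_list mem f, 8 * n⟩ ∧ ∀ i, i < n → Blk ⟨mem.ptr (stb_vorbis.comment_list_at mem f i), 1⟩

/-- **The two-address lemma of a table-of-pointers clause**: the field by `ObjEq.u64`; the SHAPE facts by `hB`; a read INSIDE the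
block by `Kept.u64`. "No pointer of `*f` points into `*f`" is the hypothesis `hk` at the transport: the table was allocated BEFORE
the target of the copy, which is fresh, so the copy kept it (`Move.kept`). -/
theorem ToyTable.transfer (n : Nat) {Blk Blk' : Block → Prop} {mem mem' : Mem} {p f : Nat} (h : ToyTable n Blk mem p)
    (he : ObjEq [(40, 48)] mem p mem' f) (hk : (Block.mk (stb_vorbis.comment_list mem p) (8 * n)).Kept mem mem')
    (hB : ∀ B, Blk B → Blk' B) : ToyTable n Blk' mem' f := by
  obtain ⟨hT, hrows⟩ := h
  simp only [vacc, voff] at hT hrows hk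
  have e : mem'.u64 (f + 40) = mem.u64 (p + 40) := he.u64 40 (by decide)
  unfold ToyTable
  simp only [vacc, voff]
  rw [e]
  constructor
  · exact hB _ hT
  · intro i hi
    rw [hk.u64 _ (by dsimp only; omega) (by dsimp only; omega)]
    exact hB _ (hrows i hi)

/-- … and its instance `Copied`. -/
theorem ToyTable.moves (n : Nat) : Group.Moves (ToyTable n) :=
  fun _ _ _ _ _ _ hm h => ToyTable.transfer n h (hm.objEq (by decide)) (hm.kept h.1) hm.sub

/-- **Where the hypotheses of `Move` come from** in stb_vorbis_open_memory after `memcpy(f, &p, 1808)` returned: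
`hcp` and `hfoot` are memcpy's post and footprint; `hok`: the laws of the block predicate before the allocation; `hfresh` is
setup_malloc's post (the new block is disjoint from every block allocated before: AR3); `hsub` / `hob`: the new block predicate is
the old one plus the block; `hr`: the block lies in the arena. -/
example (Blk Blk' : Block → Prop) (mem mem' : Mem) (p f : Nat) (hcp : Copied mem p mem' f Off.sizeof.stb_vorbis)
    (hfoot : Mem.SameExcept [⟨f, f + Off.sizeof.stb_vorbis⟩] mem mem') (hok : BlkOK Blk)
    (hfresh : ∀ B, Blk B → B.disjoint (objBlock f)) (hsub : ∀ B, Blk B → Blk' B) (hob : OB1 Blk' f)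
    (hr : 0x400000 ≤ f ∧ f + Off.sizeof.stb_vorbis ≤ 0xC00000) : Move Blk Blk' mem mem' p f :=
  ⟨hcp, hfoot, hok, hfresh, hsub, hob, hr⟩

/-- **THE TRANSPORT in stb_vorbis_open_memory**: after `f = vorbis_alloc(&p)` and `memcpy(f, &p, 1808)`, `VorbisOK(&p)` has become
`VorbisOK f`, ADO holds for the copy, and the point is P5 — from which vorbis_pump_first_frame starts. -/
example (G : Groups) (hL : G.Laws) (A' : G.Arena) (Blk Blk' : Block → Prop) (Live' : Nat → Prop) (mem mem' : Mem) (p f : Nat)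
    (hm : Move Blk Blk' mem mem' p f) (henv : Env Blk' Live' mem) (h : VorbisOK G Blk mem p) (hado : G.ADO A' mem p)
    (hself : G.HasSetup A' (objBlock f)) (hfirst : stb_vorbis.first_decode mem p = 1) :
    FB G A' Blk' Live' mem' f 0 0 :=
  (P5.of_move hL hm henv h hado hself hfirst).fb

/-! ### (e) The points -/

/-- An error return of the floor section (between SD.5 and SD.6, from a state that still satisfies SD.5): stb_vorbis_open_memory may
call `vorbis_deinit(&p)` — `residue_config` and `mapping` are still NULL because the rest of `*f` is zero. -/
example (G : Groups) (hL : G.Laws) (A : G.Arena) (Blk : Block → Prop) (Live : Nat → Prop) (mem : Mem) (f R : Nat)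
    (h : SD G 5 A Blk Live mem f R) : DeinitOK Blk mem f ∧ stb_vorbis.mapping mem f = 0 := by
  constructor
  · exact (h.err hL).deinit
  · exact h.rest.mapping_null (restFrom_le_mapping (by omega))

/-- `return TRUE` loads eax from `[rsp+0x20]`: the value is 1 by the frame constants; and the state is full `VorbisOK(&p)`. -/
example (G : Groups) (hL : G.Laws) (A : G.Arena) (Blk : Block → Prop) (Live : Nat → Prop) (mem : Mem) (f R : Nat)
    (h : SD G 12 A Blk Live mem f R) : mem.u32 (R + 0x20) = 1 ∧ VorbisOK G Blk mem f ∧ FinalTest mem f :=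
  ⟨h.frame.one20, h.vorbisOK hL, (h.temp (by omega)).2⟩

/-- `c->sparse = ordered ? 0 : get_bits(f,1)` on the ordered path reads the byte `[rsp+0x10]` as the constant 0 (K2 depends on
it): available at the head of every iteration of the codebook loop. -/
example (G : Groups) (A : G.Arena) (Blk : Block → Prop) (Live : Nat → Prop) (mem : Mem) (f R i : Nat)
    (h : SD4 G i A Blk Live mem f R) : mem.u8 (R + 0x10) = 0 ∧ mem.u32 (R + 0x24) = 0 :=
  ⟨h.frame.z10 (by omega), h.frame.z24 (by omega) (by omega)⟩

/-- The loop invariant of the codebook loop advances: book `i` is finished, the books from `i + 1` on are still zero. -/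
example (G : Groups) (Blk : Block → Prop) (mem : Mem) (f i : Nat) (h : CodebooksUpTo G i Blk mem f)
    (hi : (i : Int) < stb_vorbis.codebook_count mem f) (hnew : G.CodebookOK Blk mem (stb_vorbis.codebooks_at mem f i)) :
    CodebooksUpTo G (i + 1) Blk mem f :=
  h.succ hi hnew

/-- **The shadow layer comes from Q0's `ShadowInv`**: with `Live := Live (stackObjs frames ++ others)` the field `covers` of the
environment of every point is `ShadowInv.covers`; `ok` and `live` are the laws of the block predicate in use (for the arena's
setup blocks: `ArenaOK.blkOK`, `ArenaOK.blkLive`). -/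
example (G : Groups) (Blk : Block → Prop) (others : List Obj) (frames : List (Nat × FrameLayout)) (top : Nat) (mem : Mem)
    (f : Nat) (hs : ShadowInv others frames top mem) (hok : BlkOK Blk)
    (hlive : BlkLive Blk (Live (stackObjs frames ++ others))) (hd : DeinitOK Blk mem f) (hb : G.Bits Blk mem f) :
    SDERR G Blk (Live (stackObjs frames ++ others)) mem f :=
  ⟨⟨hs.covers, hok, hlive⟩, hd, hb⟩

/-! ### (f) The windows, end to end -/

/-- **vorbis_decode_packet_rest's tail gives vorbis_finish_frame's precondition** — from W1 alone (DECISIONS D-7): a long block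
(`n = b1`) after a short one (`prev = false`), not the first frame, `d` samples still to discard, the last page truncated. -/
example (b0 b1 d d' left len : Int) (next : Bool) (hb : HD3v b0 b1) (h0 : 0 ≤ d) (h1 : d ≤ (b1 - b0) / 4)
    (hd : Discard b1 ((b1 - b0) / 4) (if next then b1 / 2 else (3 * b1 - b0) / 4) (if next then b1 else (3 * b1 + b0) / 4)
      false d d' left)
    (hl : LenSet left (if next then b1 else (3 * b1 + b0) / 4) len) :
    FinishPre b1 len left (if next then b1 / 2 else (3 * b1 - b0) / 4) ∧ 0 ≤ d' ∧ d' ≤ (b1 - b0) / 4 := by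
  have hw := W2.long b0 b1 false next
  simp only [Bool.false_eq_true, if_false] at hw
  have h3 := W3.of_tail hb hw h0 h1 hd hl
  have hs := hd.sound hb hw h0 h1
  exact ⟨h3.finishPre, hs.1⟩

/-- The uint32 test of the short final frame: the value stored to `*len` before `+= left_start` is non-negative and small. -/
example (cl ce : Nat) (left re : Int) (hcl : cl < 2 ^ 32) (hce : ce < 2 ^ 32) (h0 : 0 ≤ re - left) (hk : re - left ≤ 8192)
    (htest : ce < (cl + (re - left).toNat) % 2 ^ 32) (hge : cl ≤ ce) : ((ce - cl : Nat) : Int) < re - left := by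
  have := trunc_len cl ce (re - left).toNat hcl hce (by omega) htest hge
  omega

/-! ### No axiom beyond Lean's three -/

#print axioms VorbisOK.moves
#print axioms VorbisOK.carries
#print axioms SD.deinitOK
#print axioms P5.of_move
#print axioms DeinitOK.transfer
#print axioms Discard.sound
#print axioms W3.of_tail
#print axioms model_laws

end Vorbis.StateTest
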